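-- pv_equiv track=rewrite | github.com/biotite-dev/biotite | doc/viewcode.py | _index_cython_code
-- ===== SOURCE A (Python) =====
-- def _index_cython_code(code_lines):
--     """
--     Find the line position of classes and functions in *Cython* files.
--
--     This analyzer works in a very simple way:
--     It looks for the `def` and `class` keywords at zero-indentation
--     level and determines the end of a class/function by the start of the
--     next zero-indentation level attribute or the end of the file,
--     respectively.
--
--     By the nature of this approach, methods or inner classes are not
--     identified.
--
--     Parameters
--     ----------
--     code_lines : list of str
--         The *Cython* source code splitted into lines.
--
--     Returns
--     -------
--     line_index : dict (str -> tuple(int, int))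
--         Maps an attribute name to its first and last line in a Cython
--         module.
--     """
--     line_index = {}
--
--     for i in range(len(code_lines)):
--         line = code_lines[i]
--         stripped_line = line.strip()
--
--         # Skip empty and comment lines
--         if len(stripped_line) == 0 or stripped_line[0] == "#":
--             continue
--
--         if line.startswith(("def")):
--             # Get name of the function:
--             # Remove 'def' from line...
--             cropped_line = stripped_line[3:].strip()
--             # ...and determine the end of the name by finding the
--             # subsequent '('
--             cropped_line = cropped_line[: cropped_line.index("(")].strip()
--             attr_name = cropped_line
--         elif line.startswith(("class", "cdef class")):
--             cropped_line = stripped_line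
--             # Get name of the class:
--             # Remove potential 'cdef' from line...
--             if cropped_line.startswith("cdef"):
--                 cropped_line = cropped_line[4:].strip()
--             # ...and remove 'class' from line...
--             cropped_line = cropped_line[5:].strip()
--             # ...and determine the end of the name by finding the
--             # subsequent '(' or ':'
--             index = (
--                 cropped_line.index("(")
--                 if "(" in cropped_line
--                 else cropped_line.index(":")
--             )
--             cropped_line = cropped_line[:index].strip()
--             attr_name = cropped_line
--         else:
--             # No new attribute -> skip line
--             continue
--
--         attr_line_start = i
--         attr_line_stop = i + 1
--         for j in range(i + 1, len(code_lines)):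
--             attr_line = code_lines[j]
--             if len(attr_line.strip()) == 0 or attr_line.strip()[0] == "#":
--                 continue
--             indent = len(attr_line) - len(attr_line.lstrip())
--             if indent == 0:
--                 # No indentation -> end of attribute
--                 break
--             else:
--                 # Exclusive stop -> +1
--                 attr_line_stop = j + 1
--
--         line_index[attr_name] = (
--             # 'One' based indexing
--             attr_line_start + 1,
--             # 'One' based indexing and inclusive stop
--             attr_line_stop,
--         )
--
--     return line_index
-- ===== SOURCE B (Python) =====
-- def _attr_name(line):
--     # Same cropping rules as the original analyzer, factored out.
--     stripped = line.strip()
--     if line.startswith("def"):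
--         rest = stripped[3:].strip()
--         return rest[: rest.index("(")].strip()
--     if line.startswith(("class", "cdef class")):
--         rest = stripped
--         if rest.startswith("cdef"):
--             rest = rest[4:].strip()
--         rest = rest[5:].strip()
--         cut = rest.index("(") if "(" in rest else rest.index(":")
--         return rest[:cut].strip()
--     return None
--
--
-- def _index_cython_code(code_lines):
--     # Single linear pass (a little state machine): keep the currently open
--     # attribute as (name, start, stop); an indented significant line extends
--     # its stop, a zero-indent significant line closes it (and possibly opens
--     # a new one).  No inner re-scan of the file per header as in A.
--     line_index = {}
--     current = None  # open attribute: (name, one-based start, exclusive stop)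
--     for i, line in enumerate(code_lines):
--         stripped = line.strip()
--         if not stripped or stripped.startswith("#"):
--             continue
--         indent = len(line) - len(line.lstrip())
--         if indent == 0:
--             if current is not None:
--                 line_index[current[0]] = (current[1], current[2])
--             name = _attr_name(line)
--             current = (name, i + 1, i + 1) if name is not None else None
--         elif current is not None:
--             current = (current[0], current[1], i + 1)
--     if current is not None:
--         line_index[current[0]] = (current[1], current[2])
--     return line_index
-- ===== Notes on version B (the rewrite author's own statement) =====
-- stated objective: alternative
-- what changed: B is a single linear pass with a state machine holding the currently open attribute (name, start, stop), closing it when the next zero-indent significant line or EOF arrives, instead of A's nested forward re-scan of the raw lines for every header.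
import Mathlib
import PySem

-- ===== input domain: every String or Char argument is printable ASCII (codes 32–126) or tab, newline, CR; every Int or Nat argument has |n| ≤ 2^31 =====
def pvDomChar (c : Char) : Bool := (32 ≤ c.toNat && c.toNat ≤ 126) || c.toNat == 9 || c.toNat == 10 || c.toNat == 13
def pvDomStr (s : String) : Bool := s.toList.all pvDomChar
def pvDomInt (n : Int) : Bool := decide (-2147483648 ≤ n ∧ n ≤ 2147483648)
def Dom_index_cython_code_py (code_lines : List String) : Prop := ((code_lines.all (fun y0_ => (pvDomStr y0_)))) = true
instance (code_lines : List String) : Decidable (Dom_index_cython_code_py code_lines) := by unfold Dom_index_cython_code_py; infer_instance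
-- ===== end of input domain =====

-- B replaces A's nested per-header forward re-scan by ONE linear pass with a state
-- machine holding the currently open attribute (alternative algorithm; same value).

-- ===== PORT A =====

-- inner loop 'for j in range(i + 1, len(code_lines))' of A, over the remaining lines
def pvInnerA (j : Int) (stop : Int) (ls : List String) : Int :=
  match ls with
  | [] => stop
  | l :: t =>
    let s := PySem.Str.strip l
    if PySem.Str.len s == 0 || PySem.Str.pyGet? s 0 == some '#' then
      pvInnerA (j + 1) stop t
    else if PySem.Str.len l - PySem.Str.len (PySem.Str.lstrip l) == 0 then
      stop
    else
      pvInnerA (j + 1) (j + 1) t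

-- outer loop 'for i in range(len(code_lines))' of A; '.index' is ported via find, which agrees
-- with Python wherever Pre_ holds (Pre_ excludes exactly the ValueError inputs)
def pvLoopA (ls : List String) (i : Int) (d : PySem.Dict String (Int × Int)) :
    PySem.Dict String (Int × Int) :=
  match ls with
  | [] => d
  | l :: t =>
    let s := PySem.Str.strip l
    if PySem.Str.len s == 0 || PySem.Str.pyGet? s 0 == some '#' then
      pvLoopA t (i + 1) d
    else if PySem.Str.startswith l "def" then
      let c1 := PySem.Str.strip (PySem.Str.slice s (some 3) none)
      let name := PySem.Str.strip (PySem.Str.slice c1 none (some (PySem.Str.find c1 "(")))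
      pvLoopA t (i + 1) (d.insert name (i + 1, pvInnerA (i + 1) (i + 1) t))
    else if PySem.Str.startswith l "class" || PySem.Str.startswith l "cdef class" then
      let c1 := if PySem.Str.startswith s "cdef" then
          PySem.Str.strip (PySem.Str.slice s (some 4) none) else s
      let c2 := PySem.Str.strip (PySem.Str.slice c1 (some 5) none)
      let idx := if PySem.Str.isIn "(" c2 then PySem.Str.find c2 "(" else PySem.Str.find c2 ":"
      let name := PySem.Str.strip (PySem.Str.slice c2 none (some idx))
      pvLoopA t (i + 1) (d.insert name (i + 1, pvInnerA (i + 1) (i + 1) t))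
    else
      pvLoopA t (i + 1) d

def index_cython_code_py (code_lines : List String) : List (String × Int × Int) :=
  (pvLoopA code_lines 0 PySem.Dict.empty).items

-- ===== PORT B =====

-- helper _attr_name of B: name of a def/class header line, None otherwise
def pvAttrName (line : String) : Option String :=
  let stripped := PySem.Str.strip line
  if PySem.Str.startswith line "def" then
    let rest := PySem.Str.strip (PySem.Str.slice stripped (some 3) none)
    some (PySem.Str.strip (PySem.Str.slice rest none (some (PySem.Str.find rest "("))))
  else if PySem.Str.startswith line "class" || PySem.Str.startswith line "cdef class" then
    let rest1 := if PySem.Str.startswith stripped "cdef" then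
        PySem.Str.strip (PySem.Str.slice stripped (some 4) none) else stripped
    let rest2 := PySem.Str.strip (PySem.Str.slice rest1 (some 5) none)
    let cut := if PySem.Str.isIn "(" rest2 then PySem.Str.find rest2 "(" else PySem.Str.find rest2 ":"
    some (PySem.Str.strip (PySem.Str.slice rest2 none (some cut)))
  else
    none

-- 'line_index[current[0]] = (current[1], current[2])' if an attribute is open
def pvClose (d : PySem.Dict String (Int × Int)) (cur : Option (String × Int × Int)) :
    PySem.Dict String (Int × Int) :=
  match cur with
  | none => d
  | some (n, a, b) => d.insert n (a, b)

-- B's single loop 'for i, line in enumerate(code_lines)' with state (line_index, current)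
def pvLoopB (ls : List (Int × String)) (d : PySem.Dict String (Int × Int))
    (cur : Option (String × Int × Int)) : PySem.Dict String (Int × Int) :=
  match ls with
  | [] => pvClose d cur
  | (i, line) :: rest =>
    let s := PySem.Str.strip line
    if PySem.Str.len s == 0 || PySem.Str.startswith s "#" then
      pvLoopB rest d cur
    else if PySem.Str.len line - PySem.Str.len (PySem.Str.lstrip line) == 0 then
      let d' := pvClose d cur
      match pvAttrName line with
      | some name => pvLoopB rest d' (some (name, i + 1, i + 1))
      | none => pvLoopB rest d' none
    else
      match cur with
      | some (n, a, _) => pvLoopB rest d (some (n, a, i + 1))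
      | none => pvLoopB rest d none

def index_cython_code_py_alt (code_lines : List String) : List (String × Int × Int) :=
  (pvLoopB (PySem.List.enumerate code_lines) PySem.Dict.empty none).items

-- ===== PRECONDITION & SPEC =====
-- Pre_ excludes exactly the inputs on which the Python A raises ValueError from '.index':
-- a line starting with "def" containing no '(', or a line starting with "class"/"cdef class"
-- containing neither '(' nor ':'.  B raises there as well.
def Pre_index_cython_code_py (code_lines : List String) : Prop :=
  ∀ l ∈ code_lines,
    (PySem.Str.startswith l "def" = true → PySem.Str.isIn "(" l = true) ∧
    ((PySem.Str.startswith l "class" = true ∨ PySem.Str.startswith l "cdef class" = true) →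
      (PySem.Str.isIn "(" l = true ∨ PySem.Str.isIn ":" l = true))
instance (code_lines : List String) : Decidable (Pre_index_cython_code_py code_lines) := by
  unfold Pre_index_cython_code_py; infer_instance

def pvWitness_index_cython_code_py : List String :=
  ["def f(x):", "    return x", "", "# comment", "class C:", "    pass", "cdef class D(E):", "    x = 1"]

def Spec_index_cython_code_py (code_lines : List String) (out : List (String × Int × Int)) : Prop :=
  out = index_cython_code_py_alt code_lines
instance (code_lines : List String) (out : List (String × Int × Int)) :
    Decidable (Spec_index_cython_code_py code_lines out) := by
  unfold Spec_index_cython_code_py; infer_instance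

-- ===== CLAIM (what is proved, stated in full; the proofs are below) =====
def Claim_equal_index_cython_code_py : Prop :=
  ∀ (code_lines : List String), Dom_index_cython_code_py code_lines →
    Pre_index_cython_code_py code_lines →
    Spec_index_cython_code_py code_lines (index_cython_code_py code_lines)

-- ===== LEMMAS AND PROOFS =====

-- on a nonempty string, A's 'stripped[0] == "#"' test equals B's startswith test
theorem pv_head_hash (s : String) :
    (PySem.Str.pyGet? s 0 == some '#') = PySem.Str.startswith s "#" := by
  have h0 : (0 : Int) = ((0 : Nat) : Int) := rfl
  rw [h0, PySem.Str.pyGet?_natCast, PySem.Str.startswith_eq]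
  cases hc : s.toList with
  | nil => simp [PySem.Chars.startswith]
  | cons c t =>
    show (some c == some '#') = PySem.Chars.startswith (c :: t) ['#']
    rcases Bool.eq_false_or_eq_true (PySem.Chars.startswith (c :: t) ['#']) with h | h
    · rw [h]
      obtain ⟨u, hu⟩ := (PySem.Chars.startswith_iff _ _).mp h
      simp at hu; simp; exact hu.1.symm
    · rw [h, beq_eq_false_iff_ne]
      intro he
      injection he with h1
      have : PySem.Chars.startswith (c :: t) ['#'] = true :=
        (PySem.Chars.startswith_iff _ _).mpr ⟨t, by rw [h1]; rfl⟩
      rw [h] at this; exact Bool.false_ne_true this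

-- a line starting with a non-whitespace prefix has indent 0
theorem pv_indent_zero_of_startswith (l : String) (p : String) (c : Char) (t : List Char)
    (hp : p.toList = c :: t) (hc : PySem.Chars.isspace c = false)
    (hsw : PySem.Str.startswith l p = true) :
    PySem.Str.len l - PySem.Str.len (PySem.Str.lstrip l) = 0 := by
  rw [PySem.Str.startswith_eq] at hsw
  obtain ⟨u, hu⟩ := (PySem.Chars.startswith_iff _ _).mp hsw
  rw [hp] at hu
  have hl : (PySem.Str.lstrip l).toList = l.toList := by
    rw [PySem.Str.toList_lstrip]
    show List.dropWhile PySem.Chars.isspace l.toList = l.toList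
    rw [← hu]
    simp [hc]
  rw [PySem.Str.len_eq, PySem.Str.len_eq, hl]
  omega

-- A's pending-insert view of B's state: what the open attribute will contribute
def pvAcc (d : PySem.Dict String (Int × Int)) (cur : Option (String × Int × Int))
    (i : Int) (ls : List String) : PySem.Dict String (Int × Int) :=
  match cur with
  | none => d
  | some (n, a, b) => d.insert n (a, pvInnerA i b ls)

-- main invariant: B's one-pass state machine equals A's loop with the pending insert applied
theorem pv_run_eq (ls : List String) (i : Int) (d : PySem.Dict String (Int × Int))
    (cur : Option (String × Int × Int)) :
    pvLoopB (PySem.List.enumerate ls i) d cur = pvLoopA ls i (pvAcc d cur i ls) := by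
  induction ls generalizing i d cur with
  | nil =>
    cases cur with
    | none => simp [PySem.List.enumerate_nil, pvLoopB, pvLoopA, pvAcc, pvClose]
    | some p =>
      obtain ⟨n, a, b⟩ := p
      simp [PySem.List.enumerate_nil, pvLoopB, pvLoopA, pvAcc, pvClose, pvInnerA]
  | cons l t ih =>
    rw [PySem.List.enumerate_cons]
    rw [pvLoopB.eq_def]
    simp only []
    simp only [← pv_head_hash]
    rcases Bool.eq_false_or_eq_true (PySem.Str.len (PySem.Str.strip l) == 0 ||
      PySem.Str.pyGet? (PySem.Str.strip l) 0 == some '#') with ha | ha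
    · -- blank or comment line: both sides skip it
      simp only [ha, if_true]
      rw [ih]
      have hacc : pvAcc d cur (i + 1) t = pvAcc d cur i (l :: t) := by
        cases cur with
        | none => rfl
        | some p =>
          obtain ⟨n, a, b⟩ := p
          simp only [pvAcc]
          rw [pvInnerA]
          simp only [ha, if_true]
      rw [hacc, pvLoopA]
      simp only [ha, if_true]
    · -- significant line
      simp only [ha, Bool.false_eq_true, if_false]
      rcases Bool.eq_false_or_eq_true
        (PySem.Str.len l - PySem.Str.len (PySem.Str.lstrip l) == 0) with hz | hz
      · -- zero-indent significant line: B closes the open block; A's pending scan breaks here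
        simp only [hz, if_true]
        have hacc : pvAcc d cur i (l :: t) = pvClose d cur := by
          cases cur with
          | none => rfl
          | some p =>
            obtain ⟨n, a, b⟩ := p
            simp only [pvAcc, pvClose]
            rw [pvInnerA]
            simp only [ha, hz, Bool.false_eq_true, if_false, if_true]
        rw [pvLoopA]
        simp only [ha, Bool.false_eq_true, if_false]
        rw [hacc]
        simp only [pvAttrName]
        rcases Bool.eq_false_or_eq_true (PySem.Str.startswith l "def") with hd | hd
        · simp only [hd, if_true]
          rw [ih]
          rfl
        · simp only [hd, Bool.false_eq_true, if_false]
          rcases Bool.eq_false_or_eq_true (PySem.Str.startswith l "class" ||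
            PySem.Str.startswith l "cdef class") with hcl | hcl
          · simp only [hcl, if_true]
            rw [ih]
            rfl
          · simp only [hcl, Bool.false_eq_true, if_false]
            rw [ih]
            rfl
      · -- indented significant line: extends the open block; A skips it (no keyword possible)
        simp only [hz, Bool.false_eq_true, if_false]
        have hd : PySem.Str.startswith l "def" = false := by
          rcases Bool.eq_false_or_eq_true (PySem.Str.startswith l "def") with h | h
          · have := pv_indent_zero_of_startswith l "def" 'd' ['e','f'] (by decide) (by decide) h
            rw [beq_eq_false_iff_ne] at hz; exact absurd this hz
          · exact h
        have hc1 : PySem.Str.startswith l "class" = false := by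
          rcases Bool.eq_false_or_eq_true (PySem.Str.startswith l "class") with h | h
          · have := pv_indent_zero_of_startswith l "class" 'c' ['l','a','s','s']
              (by decide) (by decide) h
            rw [beq_eq_false_iff_ne] at hz; exact absurd this hz
          · exact h
        have hc2 : PySem.Str.startswith l "cdef class" = false := by
          rcases Bool.eq_false_or_eq_true (PySem.Str.startswith l "cdef class") with h | h
          · have := pv_indent_zero_of_startswith l "cdef class" 'c'
              ['d','e','f',' ','c','l','a','s','s'] (by decide) (by decide) h
            rw [beq_eq_false_iff_ne] at hz; exact absurd this hz
          · exact h
        have hA : pvLoopA (l :: t) i (pvAcc d cur i (l :: t)) =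
            pvLoopA t (i + 1) (pvAcc d cur i (l :: t)) := by
          rw [pvLoopA]
          simp only [ha, hd, hc1, hc2, Bool.false_eq_true, if_false, Bool.or_self]
        rw [hA]
        cases cur with
        | none => exact ih (i + 1) d none
        | some p =>
          obtain ⟨n, a, b⟩ := p
          have h1 : pvInnerA i b (l :: t) = pvInnerA (i + 1) (i + 1) t := by
            rw [pvInnerA]
            simp only [ha, hz, Bool.false_eq_true, if_false]
          refine (ih (i + 1) d (some (n, a, i + 1))).trans ?_
          simp only [pvAcc, h1]

-- ===== VERDICT (by name: the statement is the Claim_ definition above) =====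
theorem index_cython_code_py_spec : Claim_equal_index_cython_code_py := by
  intro code_lines _ _
  unfold Spec_index_cython_code_py index_cython_code_py index_cython_code_py_alt
  rw [pv_run_eq]
  rfl
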